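-- pv_equiv track=rewrite | github.com/BAN2ARU/Coding-test | 프로그래머스/lv0/120878. 유한소수 판별하기/유한소수 판별하기.py | solution
-- ===== SOURCE A (Python) =====
-- def solution(a, b):
--     answer = 0
--     gcm = lambda x,y: y if x%y == 0 else gcm(y, x%y)
--     gcm_v = gcm(max(a,b), min(a,b))
--     b = b // gcm_v
--
--
--     for i in range(2, b//2 + 1) :
--         if b % i == 0 :
--             if i % 2 == 0 or i % 5 == 0:
--                 continue
--             return 2
--     return 1 if b % 2 == 0 or b % 5 ==0 or b==1 else 2
-- ===== SOURCE B (Python) =====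
-- def solution(a, b):
--     # gcd of the magnitudes, then strip all factors 2 and 5 from the reduced denominator
--     x, y = abs(a), abs(b)
--     while y:
--         x, y = y, x % y
--     d = abs(b) // x
--     while d % 2 == 0:
--         d //= 2
--     while d % 5 == 0:
--         d //= 5
--     return 1 if d == 1 else 2
-- ===== Notes on version B (the rewrite author's own statement) =====
-- stated objective: faster
-- what changed: A's trial scan over every candidate divisor up to b//2 is replaced by a gcd of the magnitudes followed by stripping all factors 2 and 5 from the reduced denominator and checking the remainder is 1; Pre_ excludes min(a,b)==0, where A's gcd lambda raises ZeroDivisionError, and the undefined zero-denominator fractions b==0.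
-- intended difference: For a < 0 < b the reduced denominator A computes is negative, so its divisor scan is empty and it answers 1 exactly when that denominator is divisible by 2 or 5 (e.g. 1 for -5/6, 2 for -3/3), while B returns 1 exactly when the reduced denominator's magnitude has no prime factors other than 2 and 5, which is the intended finite-decimal verdict. — e.g. on solution(-3, 3): A returns 2, B returns 1
-- outside the precondition, e.g. on solution(-3, 0): A returns 1, B does not finish within the time limit
import Mathlib
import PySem

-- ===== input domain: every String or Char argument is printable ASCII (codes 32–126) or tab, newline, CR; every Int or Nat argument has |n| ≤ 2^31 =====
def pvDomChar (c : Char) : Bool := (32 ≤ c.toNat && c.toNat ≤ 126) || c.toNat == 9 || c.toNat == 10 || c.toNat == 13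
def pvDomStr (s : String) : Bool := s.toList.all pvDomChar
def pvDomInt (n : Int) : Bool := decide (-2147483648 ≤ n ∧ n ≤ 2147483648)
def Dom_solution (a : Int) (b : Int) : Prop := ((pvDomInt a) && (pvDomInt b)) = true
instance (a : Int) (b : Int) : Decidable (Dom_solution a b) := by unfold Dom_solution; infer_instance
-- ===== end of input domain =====

-- B reduces by the gcd of the magnitudes and strips all factors 2 and 5 from the reduced denominator instead of scanning every candidate divisor up to b//2; on a<0<b it fixes A's sign bug (see D_solution).


-- ===== PORT A =====
-- A's recursive lambda 'gcm'; none = ZeroDivisionError (Python evaluates x % 0)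
def gcmA (x y : Int) : Option Int :=
  if _hy : y = 0 then none
  else if PySem.Int.mod x y = 0 then some y
  else gcmA y (PySem.Int.mod x y)
termination_by y.natAbs
decreasing_by
  rcases lt_trichotomy y 0 with h | h | h
  · have := PySem.Int.mod_neg_bounds x h; omega
  · exact absurd h _hy
  · have h1 := PySem.Int.mod_nonneg x h; have h2 := PySem.Int.mod_lt x h; omega

-- A's for-loop over range(2, b//2 + 1) (early return 2 on the first hit) and final return, on the reduced denominator
def restA (d : Int) : Int :=
  if (PySem.List.pyRange 2 (PySem.Int.floordiv d 2 + 1) 1).any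
       (fun i => PySem.Int.mod d i == 0 && !(PySem.Int.mod i 2 == 0 || PySem.Int.mod i 5 == 0))
  then 2
  else if PySem.Int.mod d 2 = 0 ∨ PySem.Int.mod d 5 = 0 ∨ d = 1 then 1 else 2

def solution (a : Int) (b : Int) : Int :=
  match gcmA (max a b) (min a b) with
  | none => 0   -- unreachable under Pre_solution: Python A raises ZeroDivisionError here
  | some g => restA (PySem.Int.floordiv b g)

-- ===== PORT B =====
-- x, y = abs(a), abs(b); while y: x, y = y, x % y
def euclidB (x y : Int) : Int :=
  if _hy : y = 0 then x else euclidB y (PySem.Int.mod x y)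
termination_by y.natAbs
decreasing_by
  rcases lt_trichotomy y 0 with h | h | h
  · have := PySem.Int.mod_neg_bounds x h; omega
  · exact absurd h _hy
  · have h1 := PySem.Int.mod_nonneg x h; have h2 := PySem.Int.mod_lt x h; omega

-- while d % p == 0: d //= p  — Source B runs this only with 1 ≤ d and p ∈ {2, 5};
-- the extra bounds in the guard only make the recursion total and never fire on those inputs
def stripB (p d : Int) : Int :=
  if h : 2 ≤ p ∧ 1 ≤ d ∧ PySem.Int.mod d p = 0 then stripB p (PySem.Int.floordiv d p) else d
termination_by d.toNat
decreasing_by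
  obtain ⟨hp, hd, hm⟩ := h
  have hdvd : p ∣ d := (PySem.Int.mod_eq_zero_iff_dvd d p).mp hm
  have h1 : d / p * p = d := Int.ediv_mul_cancel hdvd
  have h0 : 0 ≤ d / p := Int.ediv_nonneg (by omega) (by omega)
  have he : PySem.Int.floordiv d p = d / p := PySem.Int.floordiv_eq_ediv_of_pos (by omega)
  have : d / p < d := by nlinarith
  omega

def solution_alt (a : Int) (b : Int) : Int :=
  let g := euclidB |a| |b|
  let d := PySem.Int.floordiv |b| g
  if stripB 5 (stripB 2 d) = 1 then 1 else 2

-- ===== PRECONDITION & SPEC =====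
-- Pre_ excludes min(a,b) = 0, where A's gcd lambda raises ZeroDivisionError, and the zero
-- denominator b = 0 (the fraction a/0 is undefined; A's returned 1 there is accidental and B does not terminate).
def Pre_solution (a : Int) (b : Int) : Prop := min a b ≠ 0 ∧ b ≠ 0
instance (a : Int) (b : Int) : Decidable (Pre_solution a b) := by unfold Pre_solution; infer_instance
def pvWitness_solution : Int × Int := (3, 6)

-- For a < 0 < b the reduced denominator A computes is negative, so its divisor scan is empty and its
-- final line answers 1 iff that denominator is divisible by 2 or 5 — wrong exactly when that test
-- disagrees with "only prime factors 2 and 5" (e.g. A returns 1 for -5/6 and 2 for -3/3), where B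
-- returns the intended verdict on the reduced denominator's magnitude.
def D_solution (a : Int) (b : Int) : Prop :=
  a < 0 ∧ 0 < b ∧
    ¬ ((b / (Int.gcd a b : Int)) ∣ (10:Int)^31 ↔
        ((2:Int) ∣ b / (Int.gcd a b : Int) ∨ (5:Int) ∣ b / (Int.gcd a b : Int)))
instance (a : Int) (b : Int) : Decidable (D_solution a b) := by unfold D_solution; infer_instance

def Spec_solution (a : Int) (b : Int) (out : Int) : Prop := ¬ D_solution a b → out = solution_alt a b
instance (a : Int) (b : Int) (out : Int) : Decidable (Spec_solution a b out) := by unfold Spec_solution; infer_instance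

def pvDiffWitness_solution : Int × Int := (-3, 3)
def pvDiffWitnessOut_solution : Int × Int := (2, 1)

-- ===== CLAIM (what is proved, stated in full; the proofs are below) =====
def Claim_unchanged_solution : Prop := ∀ (a : Int) (b : Int), Dom_solution a b → Pre_solution a b → Spec_solution a b (solution a b)
def Claim_changed_solution : Prop := Dom_solution (pvDiffWitness_solution.1) (pvDiffWitness_solution.2) ∧ Pre_solution (pvDiffWitness_solution.1) (pvDiffWitness_solution.2) ∧ D_solution (pvDiffWitness_solution.1) (pvDiffWitness_solution.2) ∧ solution (pvDiffWitness_solution.1) (pvDiffWitness_solution.2) = pvDiffWitnessOut_solution.1 ∧ solution_alt (pvDiffWitness_solution.1) (pvDiffWitness_solution.2) = pvDiffWitnessOut_solution.2 ∧ pvDiffWitnessOut_solution.1 ≠ pvDiffWitnessOut_solution.2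
def Claim_exact_solution : Prop := ∀ (a : Int) (b : Int), Dom_solution a b → Pre_solution a b → D_solution a b → solution a b ≠ solution_alt a b

-- ===== LEMMAS AND PROOFS =====

-- one Euclid step preserves the gcd
theorem gcd_step (x y : Int) : Int.gcd y (PySem.Int.mod x y) = Int.gcd x y := by
  have h := PySem.Int.floordiv_mul_add_mod x y
  have hm : PySem.Int.mod x y = x + -(PySem.Int.floordiv x y) * y := by linear_combination h
  rw [hm, Int.gcd_add_mul_right_right, Int.gcd_comm]

-- A's recursive gcd returns a value whose magnitude is the gcd and whose sign is the second argument's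
theorem gcmA_spec (x y : Int) (hy : y ≠ 0) :
    ∃ g, gcmA x y = some g ∧ g.natAbs = Int.gcd x y ∧ (0 < y → 0 < g) ∧ (y < 0 → g < 0) := by
  induction x, y using gcmA.induct with
  | case1 x => exact absurd rfl hy
  | case2 x y h hm =>
      refine ⟨y, ?_, ?_, fun h' => h', fun h' => h'⟩
      · rw [gcmA, dif_neg h, if_pos hm]
      · have hdvd : y ∣ x := (PySem.Int.mod_eq_zero_iff_dvd x y).mp hm
        have habs : Nat.gcd x.natAbs y.natAbs = y.natAbs :=
          Nat.gcd_eq_right (Int.natAbs_dvd_natAbs.mpr hdvd)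
        simpa [Int.gcd] using habs.symm
  | case3 x y h hm ih =>
      obtain ⟨g, heq, hnat, hp, hn⟩ := ih hm
      refine ⟨g, ?_, ?_, ?_, ?_⟩
      · rw [gcmA, dif_neg h, if_neg hm]; exact heq
      · rw [hnat]; exact gcd_step x y
      · intro hy0; exact hp (lt_of_le_of_ne (PySem.Int.mod_nonneg x hy0) (Ne.symm hm))
      · intro hy0; exact hn (lt_of_le_of_ne (PySem.Int.mod_neg_bounds x hy0).2 hm)

-- B's Euclid loop on nonnegative inputs computes the gcd
theorem euclidB_gcd (x y : Int) (hx : 0 ≤ x) (hy : 0 ≤ y) : euclidB x y = (Int.gcd x y : Int) := by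
  induction x, y using euclidB.induct with
  | case1 x =>
      rw [euclidB, dif_pos rfl, Int.gcd_zero_right]
      omega
  | case2 x y h ih =>
      have hy0 : 0 < y := lt_of_le_of_ne hy (Ne.symm h)
      rw [euclidB, dif_neg h, ih hy (PySem.Int.mod_nonneg x hy0)]
      rw [gcd_step]

theorem gcd_maxmin (a b : Int) : Int.gcd (max a b) (min a b) = Int.gcd a b := by
  rcases le_total a b with h | h
  · rw [max_eq_right h, min_eq_left h, Int.gcd_comm]
  · rw [max_eq_left h, min_eq_right h]

theorem floordiv_mul_cancel_left (g q : Int) (h : g ≠ 0) : PySem.Int.floordiv (g * q) g = q := by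
  simp [PySem.Int.floordiv]
  exact Int.mul_fdiv_cancel_left q h

-- when stripB recurses, the quotient is positive and exact
theorem stripB_quot_pos (p d : Int) (h : 2 ≤ p ∧ 1 ≤ d ∧ PySem.Int.mod d p = 0) :
    1 ≤ PySem.Int.floordiv d p ∧ PySem.Int.floordiv d p * p = d := by
  obtain ⟨hp, hd, hm⟩ := h
  have hdvd : p ∣ d := (PySem.Int.mod_eq_zero_iff_dvd d p).mp hm
  have h1 : PySem.Int.floordiv d p * p = d := by
    rw [PySem.Int.floordiv_eq_ediv_of_pos (by omega)]; exact Int.ediv_mul_cancel hdvd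
  exact ⟨by nlinarith [h1], h1⟩

theorem stripB_pos (p d : Int) : 1 ≤ d → 1 ≤ stripB p d := by
  induction d using stripB.induct (p := p) with
  | case1 x h ih =>
      intro _
      rw [stripB, dif_pos h]
      exact ih (stripB_quot_pos _ _ h).1
  | case2 x h => intro hd; rw [stripB, dif_neg h]; exact hd

theorem stripB_shape (p d : Int) : ∃ k : Nat, d = p ^ k * stripB p d := by
  induction d using stripB.induct (p := p) with
  | case1 x h ih =>
      obtain ⟨k, hk⟩ := ih
      refine ⟨k + 1, ?_⟩
      rw [stripB, dif_pos h]
      have h1 := (stripB_quot_pos _ _ h).2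
      calc x = PySem.Int.floordiv x p * p := h1.symm
        _ = (p ^ k * stripB p (PySem.Int.floordiv x p)) * p := by rw [← hk]
        _ = p ^ (k+1) * stripB p (PySem.Int.floordiv x p) := by ring
  | case2 x h => exact ⟨0, by rw [stripB, dif_neg h]; ring⟩

theorem stripB_not_dvd (p d : Int) (hp : 2 ≤ p) : 1 ≤ d → ¬ p ∣ stripB p d := by
  induction d using stripB.induct (p := p) with
  | case1 x h ih =>
      intro _
      rw [stripB, dif_pos h]
      exact ih (stripB_quot_pos _ _ h).1
  | case2 x h =>
      intro hd
      rw [stripB, dif_neg h]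
      intro hdvd
      exact h ⟨hp, hd, (PySem.Int.mod_eq_zero_iff_dvd x p).mpr hdvd⟩

-- a proper divisor of d (1 ≤ r, r ∣ d, r ≠ d) is at most d // 2
theorem dvd_le_half (r d : Int) (hr : 1 ≤ r) (hd : 1 ≤ d) (hdvd : r ∣ d) (hne : r ≠ d) :
    r ≤ PySem.Int.floordiv d 2 := by
  obtain ⟨m, hm⟩ := hdvd
  have hm1 : 1 ≤ m := by nlinarith
  have hm2 : 2 ≤ m := by
    rcases eq_or_lt_of_le hm1 with h | h
    · exfalso; apply hne; rw [hm, ← h, mul_one]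
    · omega
  rw [PySem.Int.le_floordiv_iff_mul_le (by omega)]
  nlinarith

-- A's loop fires iff some divisor of d in [2, d//2] is coprime to 10
theorem anyA_iff (d : Int) :
    ((PySem.List.pyRange 2 (PySem.Int.floordiv d 2 + 1) 1).any
       (fun i => PySem.Int.mod d i == 0 && !(PySem.Int.mod i 2 == 0 || PySem.Int.mod i 5 == 0)) = true)
    ↔ ∃ i : Int, 2 ≤ i ∧ i ≤ PySem.Int.floordiv d 2 ∧ i ∣ d ∧ ¬ (2 ∣ i) ∧ ¬ (5 ∣ i) := by
  rw [List.any_eq_true]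
  simp only [PySem.List.mem_pyRange_one, Bool.and_eq_true, beq_iff_eq, Bool.not_eq_true',
    Bool.or_eq_false_iff, beq_eq_false_iff_ne, ne_eq, PySem.Int.mod_eq_zero_iff_dvd]
  constructor
  · rintro ⟨i, ⟨h1, h2⟩, h3, h4, h5⟩; exact ⟨i, h1, by omega, h3, h4, h5⟩
  · rintro ⟨i, h1, h2, h3, h4, h5⟩; exact ⟨i, ⟨h1, by omega⟩, h3, h4, h5⟩

-- a positive integer with no factor 2 or 5 that divides 2^x * 5^y is 1
theorem dvd_pow25_eq_one (i : Int) (x y : Nat) (hi : 1 ≤ i) (hd2 : ¬ (2 ∣ i)) (hd5 : ¬ (5 ∣ i))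
    (hdvd : i ∣ 2 ^ x * 5 ^ y) : i = 1 := by
  have hic : i = ((i.toNat : Int)) := by omega
  set j := i.toNat with hj
  have hjdvd : j ∣ 2 ^ x * 5 ^ y := by
    have : (j : Int) ∣ ((2 ^ x * 5 ^ y : Nat) : Int) := by rw [← hic]; push_cast; exact_mod_cast hdvd
    exact_mod_cast this
  have hj2 : ¬ (2 ∣ j) := fun h => hd2 (by rw [hic]; exact_mod_cast Int.natCast_dvd_natCast.mpr h)
  have hj5 : ¬ (5 ∣ j) := fun h => hd5 (by rw [hic]; exact_mod_cast Int.natCast_dvd_natCast.mpr h)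
  have c2 : Nat.Coprime 2 j := (Nat.Prime.coprime_iff_not_dvd Nat.prime_two).mpr hj2
  have c5 : Nat.Coprime 5 j := (Nat.Prime.coprime_iff_not_dvd (by norm_num)).mpr hj5
  have cop : Nat.Coprime (2 ^ x * 5 ^ y) j := (c2.pow_left x).mul_left (c5.pow_left y)
  have : j = 1 := (cop.symm).eq_one_of_dvd hjdvd
  omega

-- the stripped value is 1 exactly when d (within the domain bound) divides 10^31
theorem strip_eq_one_iff (d : Int) (hd : 1 ≤ d) (hle : d ≤ 2147483648) :
    (stripB 5 (stripB 2 d) = 1) ↔ d ∣ (10:Int)^31 := by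
  have hs2 : 1 ≤ stripB 2 d := stripB_pos 2 d hd
  obtain ⟨x, hx⟩ := stripB_shape 2 d
  obtain ⟨y, hy⟩ := stripB_shape 5 (stripB 2 d)
  have hten : (10:Int)^31 = 2^31 * 5^31 := by rw [show (10:Int) = 2 * 5 by norm_num, mul_pow]
  constructor
  · intro h1
    have hd' : d = 2 ^ x * 5 ^ y := by rw [hx, hy, h1]; ring
    have h2pos : (0:Int) < 2 ^ x := pow_pos (by norm_num) x
    have h5pos : (0:Int) < 5 ^ y := pow_pos (by norm_num) y
    have hx31 : x ≤ 31 := by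
      by_contra hc
      have : (2:Int) ^ 32 ≤ 2 ^ x := pow_le_pow_right₀ (by norm_num) (by omega)
      have h2d : (2:Int) ^ x ≤ d := by nlinarith
      have : (2:Int) ^ 32 ≤ 2147483648 := by linarith
      norm_num at this
    have hy31 : y ≤ 31 := by
      by_contra hc
      have : (5:Int) ^ 32 ≤ 5 ^ y := pow_le_pow_right₀ (by norm_num) (by omega)
      have h5d : (5:Int) ^ y ≤ d := by nlinarith
      have : (5:Int) ^ 32 ≤ 2147483648 := by linarith
      norm_num at this
    rw [hd', hten]
    exact mul_dvd_mul (pow_dvd_pow 2 hx31) (pow_dvd_pow 5 hy31)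
  · intro hdvd
    set s := stripB 2 d with hsdef
    set r := stripB 5 s with hrdef
    have hrpos : 1 ≤ r := stripB_pos 5 _ hs2
    have hrs : r ∣ s := by rw [hy]; exact dvd_mul_left r (5 ^ y)
    have h2r : ¬ (2:Int) ∣ r := fun hc => stripB_not_dvd 2 d (by norm_num) hd (hc.trans hrs)
    have h5r : ¬ (5:Int) ∣ r := stripB_not_dvd 5 s (by norm_num) hs2
    have hrd : r ∣ d := hrs.trans (by rw [hx]; exact dvd_mul_left s (2 ^ x))
    exact dvd_pow25_eq_one _ 31 31 hrpos h2r h5r (by rw [← hten]; exact hrd.trans hdvd)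

-- A's tail on a positive reduced denominator equals the strip-and-compare test
theorem restA_pos (d : Int) (hd : 1 ≤ d) :
    restA d = if stripB 5 (stripB 2 d) = 1 then 1 else 2 := by
  have hr2pos : 1 ≤ stripB 2 d := stripB_pos 2 d hd
  have hrpos : 1 ≤ stripB 5 (stripB 2 d) := stripB_pos 5 _ hr2pos
  have h2nd := stripB_not_dvd 2 d (by norm_num) hd
  have h5nd := stripB_not_dvd 5 (stripB 2 d) (by norm_num) hr2pos
  obtain ⟨x, hx⟩ := stripB_shape 2 d
  obtain ⟨y, hy⟩ := stripB_shape 5 (stripB 2 d)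
  set s := stripB 2 d with hs
  set r := stripB 5 s with hrdef
  have hrdvd2 : r ∣ s := by rw [hy]; exact dvd_mul_left r (5 ^ y)
  have hsd : s ∣ d := by rw [hx]; exact dvd_mul_left s (2 ^ x)
  have hrd : r ∣ d := hrdvd2.trans hsd
  have h2r : ¬ (2 ∣ r) := fun h => h2nd (h.trans hrdvd2)
  have h5r : ¬ (5 ∣ r) := h5nd
  by_cases hr1 : r = 1
  · -- d = 2^x * 5^y : the loop finds no divisor and the final test passes
    have hdxy : d = 2 ^ x * 5 ^ y := by rw [hx, hy, hr1]; ring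
    have hany : ¬ ((PySem.List.pyRange 2 (PySem.Int.floordiv d 2 + 1) 1).any
        (fun i => PySem.Int.mod d i == 0 && !(PySem.Int.mod i 2 == 0 || PySem.Int.mod i 5 == 0)) = true) := by
      rw [anyA_iff]
      rintro ⟨i, h1, _, h3, h4, h5⟩
      exact absurd (dvd_pow25_eq_one i x y (by omega) h4 h5 (hdxy ▸ h3)) (by omega)
    have hfin : PySem.Int.mod d 2 = 0 ∨ PySem.Int.mod d 5 = 0 ∨ d = 1 := by
      simp only [PySem.Int.mod_eq_zero_iff_dvd]
      rcases Nat.eq_zero_or_pos x with hx0 | hx0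
      · rcases Nat.eq_zero_or_pos y with hy0 | hy0
        · right; right; rw [hdxy, hx0, hy0]; ring
        · right; left; rw [hdxy]; exact Dvd.dvd.mul_left (dvd_pow_self 5 (by omega)) _
      · left; rw [hdxy]; exact Dvd.dvd.mul_right (dvd_pow_self 2 (by omega)) _
    rw [restA, if_neg hany, if_pos hfin, if_pos hr1]
  · -- r ≥ 2 : A returns 2 from the loop (r ≤ d//2) or from the final test (r = d)
    have hr2 : 2 ≤ r := by omega
    rw [restA, if_neg hr1]
    by_cases hany : ((PySem.List.pyRange 2 (PySem.Int.floordiv d 2 + 1) 1).any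
        (fun i => PySem.Int.mod d i == 0 && !(PySem.Int.mod i 2 == 0 || PySem.Int.mod i 5 == 0)) = true)
    · rw [if_pos hany]
    · rw [if_neg hany]
      have hrd' : r = d := by
        by_contra hne
        exact hany ((anyA_iff d).mpr ⟨r, hr2, dvd_le_half r d hrpos hd hrd hne, hrd, h2r, h5r⟩)
      have hnofin : ¬ (PySem.Int.mod d 2 = 0 ∨ PySem.Int.mod d 5 = 0 ∨ d = 1) := by
        simp only [PySem.Int.mod_eq_zero_iff_dvd]
        rw [← hrd']
        push Not
        exact ⟨h2r, h5r, hr1⟩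
      rw [if_neg hnofin]

-- A's tail on a negative reduced denominator: the scan is empty, only the final parity test remains
theorem restA_neg (d : Int) (hd : d < 0) :
    restA d = if (2:Int) ∣ d ∨ (5:Int) ∣ d then 1 else 2 := by
  have hempty : ¬ ((PySem.List.pyRange 2 (PySem.Int.floordiv d 2 + 1) 1).any
      (fun i => PySem.Int.mod d i == 0 && !(PySem.Int.mod i 2 == 0 || PySem.Int.mod i 5 == 0)) = true) := by
    rw [anyA_iff]
    rintro ⟨i, h1, h2, -⟩
    have : PySem.Int.floordiv d 2 < 1 := by
      rw [PySem.Int.floordiv_lt_iff_lt_mul (by omega)]; omega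
    omega
  rw [restA, if_neg hempty]
  simp only [PySem.Int.mod_eq_zero_iff_dvd]
  by_cases h : (2:Int) ∣ d ∨ (5:Int) ∣ d
  · rw [if_pos (by tauto), if_pos h]
  · have hd1 : d ≠ 1 := by omega
    rw [if_neg (by tauto), if_neg h]

-- evaluation of A's port under Pre_: the reduced denominator is ±(|b| / gcd a b), negative exactly when a < 0 < b
theorem main_eval (a b : Int) (hmin : min a b ≠ 0) (hb : b ≠ 0) :
    (¬(a < 0 ∧ 0 < b) → solution a b = restA ((b.natAbs / Int.gcd a b : Nat) : Int))
    ∧ ((a < 0 ∧ 0 < b) → solution a b = restA (-((b.natAbs / Int.gcd a b : Nat) : Int))) := by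
  obtain ⟨g, heq, hnat, hp, hn⟩ := gcmA_spec (max a b) (min a b) hmin
  rw [gcd_maxmin] at hnat
  have hgpos : 0 < Int.gcd a b := Int.gcd_pos_iff.mpr (Or.inr hb)
  have hdvdInt : ((Int.gcd a b : Nat) : Int) ∣ b := Int.gcd_dvd_right a b
  have hdvdNat : Int.gcd a b ∣ b.natAbs := by
    have := Int.natAbs_dvd_natAbs.mpr hdvdInt
    simpa using this
  set n : Nat := Int.gcd a b with hn'
  set Q : Int := ((b.natAbs / n : Nat) : Int) with hQ'
  have habs : (b.natAbs : Int) = (n : Int) * Q := by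
    rw [hQ']; exact_mod_cast (Nat.mul_div_cancel' hdvdNat).symm
  rcases lt_trichotomy (min a b) 0 with hneg | h0 | hpos
  · have hg : g = -(n : Int) := by have := hn hneg; omega
    rcases lt_trichotomy b 0 with hb1 | hb2 | hb3
    · -- b < 0
      have hbn : (b.natAbs : Int) = -b := by omega
      have hprod : (n : Int) * Q = -b := by linarith [habs]
      have hbq : b = g * Q := by rw [hg]; linear_combination hprod
      constructor
      · intro _
        unfold solution
        rw [heq, hbq]
        show restA (PySem.Int.floordiv (g * Q) g) = _
        rw [floordiv_mul_cancel_left _ _ (by omega)]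
      · rintro ⟨-, hc⟩; omega
    · exact absurd hb2 hb
    · -- 0 < b and min < 0 ⇒ a < 0
      have ha : a < 0 := by omega
      have hbn : (b.natAbs : Int) = b := by omega
      have hprod : (n : Int) * Q = b := by linarith [habs]
      have hbq : b = g * (-Q) := by rw [hg]; linear_combination (-1 : Int) * hprod
      constructor
      · intro hc; exact absurd ⟨ha, hb3⟩ hc
      · intro _
        unfold solution
        rw [heq, hbq]
        show restA (PySem.Int.floordiv (g * -Q) g) = _
        rw [floordiv_mul_cancel_left _ _ (by omega)]
  · exact absurd h0 hmin
  · have hg : g = (n : Int) := by have := hp hpos; omega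
    have hb3 : 0 < b := by omega
    have hbn : (b.natAbs : Int) = b := by omega
    have hprod : (n : Int) * Q = b := by linarith [habs]
    have hbq : b = g * Q := by rw [hg]; linear_combination (-1 : Int) * hprod
    constructor
    · intro _
      unfold solution
      rw [heq, hbq]
      show restA (PySem.Int.floordiv (g * Q) g) = _
      rw [floordiv_mul_cancel_left _ _ (by omega)]
    · rintro ⟨hc, -⟩; omega

-- evaluation of B's port: gcd of magnitudes and the strip test
theorem alt_eval (a b : Int) :
    solution_alt a b = if stripB 5 (stripB 2 ((b.natAbs / Int.gcd a b : Nat) : Int)) = 1 then 1 else 2 := by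
  show (if stripB 5 (stripB 2 (PySem.Int.floordiv |b| (euclidB |a| |b|))) = 1 then 1 else 2) = _
  have h1 : euclidB |a| |b| = (Int.gcd a b : Int) := by
    rw [euclidB_gcd _ _ (abs_nonneg a) (abs_nonneg b)]
    norm_num [Int.gcd, Int.natAbs_abs]
  have h2 : |b| = ((b.natAbs : Nat) : Int) := (Int.natCast_natAbs b).symm
  rw [h1, h2, PySem.Int.floordiv_natCast]

-- basic bounds on Q = |b| / gcd
theorem Q_pos (a b : Int) (hb : b ≠ 0) : 1 ≤ ((b.natAbs / Int.gcd a b : Nat) : Int) := by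
  have hgpos : 0 < Int.gcd a b := Int.gcd_pos_iff.mpr (Or.inr hb)
  have hdvdInt : ((Int.gcd a b : Nat) : Int) ∣ b := Int.gcd_dvd_right a b
  have hdvdNat : Int.gcd a b ∣ b.natAbs := by
    have := Int.natAbs_dvd_natAbs.mpr hdvdInt
    simpa using this
  have hble : Int.gcd a b ≤ b.natAbs := Nat.le_of_dvd (by omega) hdvdNat
  have := Nat.one_le_div_iff hgpos |>.mpr hble
  omega

theorem Q_le (a b : Int) (hbd : b ≤ 2147483648) (hbd' : -2147483648 ≤ b) :
    ((b.natAbs / Int.gcd a b : Nat) : Int) ≤ 2147483648 := by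
  have h1 : b.natAbs / Int.gcd a b ≤ b.natAbs := Nat.div_le_self _ _
  omega

-- D_'s quotient equals Q when 0 < b
theorem D_quot_eq (a b : Int) (hb : 0 < b) :
    b / (Int.gcd a b : Int) = ((b.natAbs / Int.gcd a b : Nat) : Int) := by
  have hgpos : 0 < Int.gcd a b := Int.gcd_pos_iff.mpr (Or.inr (by omega))
  have hdvdInt : ((Int.gcd a b : Nat) : Int) ∣ b := Int.gcd_dvd_right a b
  have hdvdNat : Int.gcd a b ∣ b.natAbs := by
    have := Int.natAbs_dvd_natAbs.mpr hdvdInt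
    simpa using this
  have habs : (b.natAbs : Int) = (Int.gcd a b : Int) * ((b.natAbs / Int.gcd a b : Nat) : Int) :=
    by exact_mod_cast (Nat.mul_div_cancel' hdvdNat).symm
  have hb' : b = (Int.gcd a b : Int) * ((b.natAbs / Int.gcd a b : Nat) : Int) := by
    rw [← habs]; omega
  exact Int.ediv_eq_of_eq_mul_left (by omega) (by linear_combination hb')

-- ===== VERDICT PROOFS =====
theorem solution_spec : Claim_unchanged_solution := by
  intro a b hDom hPre
  obtain ⟨hmin, hb⟩ := hPre
  unfold Spec_solution
  intro hnD
  have hdom' : -2147483648 ≤ b ∧ b ≤ 2147483648 := by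
    simp [Dom_solution, pvDomInt] at hDom
    omega
  obtain ⟨hA1, hA2⟩ := main_eval a b hmin hb
  rw [alt_eval a b]
  have hQ1 : 1 ≤ ((b.natAbs / Int.gcd a b : Nat) : Int) := Q_pos a b hb
  by_cases hD0 : a < 0 ∧ 0 < b
  · have hiff : (b / (Int.gcd a b : Int)) ∣ (10:Int)^31 ↔
        ((2:Int) ∣ b / (Int.gcd a b : Int) ∨ (5:Int) ∣ b / (Int.gcd a b : Int)) := by
      by_contra hc
      exact hnD ⟨hD0.1, hD0.2, hc⟩
    rw [D_quot_eq a b hD0.2] at hiff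
    rw [hA2 hD0, restA_neg _ (by omega)]
    have hcond : ((2:Int) ∣ -((b.natAbs / Int.gcd a b : Nat) : Int) ∨
        (5:Int) ∣ -((b.natAbs / Int.gcd a b : Nat) : Int)) ↔
        (stripB 5 (stripB 2 ((b.natAbs / Int.gcd a b : Nat) : Int)) = 1) := by
      rw [dvd_neg, dvd_neg, strip_eq_one_iff _ hQ1 (Q_le a b hdom'.2 hdom'.1)]
      exact Iff.symm hiff
    rw [if_congr hcond rfl rfl]
  · rw [hA1 hD0, restA_pos _ hQ1]

theorem solution_changed : Claim_changed_solution := by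
  unfold Claim_changed_solution
  refine ⟨by decide, by decide, ?_, ?_, ?_, by decide⟩
  · show D_solution (-3) 3
    unfold D_solution
    norm_num [Int.gcd]
  · -- solution (-3) 3 = 2
    have hg : gcmA (max (-3 : Int) 3) (min (-3 : Int) 3) = some (-3) := by
      rw [show max (-3 : Int) 3 = 3 by norm_num, show min (-3 : Int) 3 = -3 by norm_num,
        gcmA, dif_neg (by norm_num), if_pos (by decide)]
    show solution (-3) 3 = 2
    unfold solution
    rw [hg]
    show restA (PySem.Int.floordiv 3 (-3)) = 2
    rw [show PySem.Int.floordiv 3 (-3) = -1 by decide, restA_neg _ (by norm_num)]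
    rw [if_neg (by decide)]
  · -- solution_alt (-3) 3 = 1
    show solution_alt (-3) 3 = 1
    rw [alt_eval]
    have hq : ((Int.natAbs (3 : Int)) / Int.gcd (-3 : Int) 3 : Nat) = 1 := by
      norm_num [Int.gcd]
    rw [hq]
    push_cast
    rw [show stripB 2 1 = 1 by rw [stripB, dif_neg (by decide)],
      show stripB 5 1 = 1 by rw [stripB, dif_neg (by decide)]]
    rw [if_pos rfl]

theorem solution_tight : Claim_exact_solution := by
  intro a b hDom hPre hD
  obtain ⟨hmin, hb⟩ := hPre
  obtain ⟨ha, hb0, hne⟩ := hD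
  have hdom' : -2147483648 ≤ b ∧ b ≤ 2147483648 := by
    simp [Dom_solution, pvDomInt] at hDom
    omega
  have hQ1 : 1 ≤ ((b.natAbs / Int.gcd a b : Nat) : Int) := Q_pos a b hb
  rw [D_quot_eq a b hb0] at hne
  rw [(main_eval a b hmin hb).2 ⟨ha, hb0⟩, restA_neg _ (by omega), alt_eval a b]
  rw [← strip_eq_one_iff _ hQ1 (Q_le a b hdom'.2 hdom'.1)] at hne
  by_cases h1 : (2:Int) ∣ ((b.natAbs / Int.gcd a b : Nat) : Int) ∨
      (5:Int) ∣ ((b.natAbs / Int.gcd a b : Nat) : Int)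
  · rw [if_pos (by simpa [dvd_neg] using h1)]
    rw [if_neg (by tauto)]
    norm_num
  · rw [if_neg (by simpa [dvd_neg] using h1)]
    rw [if_pos (by tauto)]
    norm_num
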